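-- pv_equiv track=rewrite | github.com/egerdem/orientation-calibration | recursion_r7.py | structure_ls
-- ===== SOURCE A (Python) =====
-- def key2list(dic):
--     t = list(dic.keys())
--     res = [list(row) for row in t]
--     return(res)
--
-- def structure_ls(dic):
--     keys_list = key2list(dic)
--     keys_reached = []
--     while(len(keys_list)>2):
--         keys_list = keys_list[1:-1]
--         new_keys = []
--         for i in range(len(keys_list)):
--             origin = keys_list[i]
--             l,s,n,m = origin
--             res = (l+1, s, n, m)
--             new_keys.append(res)
--         keys_reached.append(new_keys)
--         keys_list = new_keys
--     return(keys_reached)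
-- ===== SOURCE B (Python) =====
-- def key2list(dic):
--     t = list(dic.keys())
--     res = [list(row) for row in t]
--     return res
--
-- def structure_ls(dic):
--     orig = key2list(dic)
--     k = len(orig)
--     return [[(orig[i][0] + j, orig[i][1], orig[i][2], orig[i][3])
--              for i in range(j, k - j)]
--             for j in range(1, (k + 1) // 2)]
-- ===== Notes on version B (the rewrite author's own statement) =====
-- stated objective: alternative
-- what changed: B replaces A's iterated trim-and-reincrement while-loop by a doubly nested comprehension that computes every level independently from the original key list: level j is the rows at indices j..k-j-1 with j added to the first coordinate, with the number of levels given in closed form as (k+1)//2 - 1.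
import Mathlib
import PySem

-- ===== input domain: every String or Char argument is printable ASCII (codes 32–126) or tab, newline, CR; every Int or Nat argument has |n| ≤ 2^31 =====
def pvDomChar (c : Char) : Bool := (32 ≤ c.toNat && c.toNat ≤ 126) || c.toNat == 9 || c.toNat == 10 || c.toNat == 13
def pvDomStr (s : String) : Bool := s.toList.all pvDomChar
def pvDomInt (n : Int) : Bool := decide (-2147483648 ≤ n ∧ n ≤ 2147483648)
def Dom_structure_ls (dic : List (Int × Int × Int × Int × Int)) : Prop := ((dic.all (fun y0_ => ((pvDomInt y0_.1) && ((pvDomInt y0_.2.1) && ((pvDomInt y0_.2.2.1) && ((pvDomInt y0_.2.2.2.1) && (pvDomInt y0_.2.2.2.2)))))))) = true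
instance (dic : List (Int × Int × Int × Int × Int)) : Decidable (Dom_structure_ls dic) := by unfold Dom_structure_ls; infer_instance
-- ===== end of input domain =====

-- B replaces A's iterated trim-and-reincrement while-loop by a doubly nested
-- comprehension computing each level independently from the original key list,
-- with the level count in closed form (objective: alternative; same cost).

-- shared helper: key2list(dic) = the dict's keys (first occurrences, insertion order) as rows
def key2list (dic : List (Int × Int × Int × Int × Int)) : List (Int × Int × Int × Int) :=
  PySem.List.dedup (dic.map (fun r => (r.1, r.2.1, r.2.2.1, r.2.2.2.1)))

-- ===== PORT A =====
-- the while-loop of A: trim both ends, add 1 to the first coordinate, repeat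
def pvALoop (keys_list : List (Int × Int × Int × Int)) : List (List (Int × Int × Int × Int)) :=
  if h : keys_list.length > 2 then
    let trimmed := PySem.List.slice keys_list (some 1) (some (-1))      -- keys_list[1:-1]
    let new_keys := trimmed.map (fun r => (r.1 + 1, r.2.1, r.2.2.1, r.2.2.2))
    new_keys :: pvALoop new_keys
  else []
termination_by keys_list.length
decreasing_by
  simp only [List.length_map, PySem.List.length_slice, PySem.List.clampIdx_neg_one]
  simp [PySem.List.clampIdx]
  omega

def structure_ls (dic : List (Int × Int × Int × Int × Int)) : List (List (Int × Int × Int × Int)) :=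
  pvALoop (key2list dic)

-- ===== PORT B =====
-- inner comprehension: [(orig[i][0]+j, orig[i][1], orig[i][2], orig[i][3]) for i in range(j, k-j)]
-- (every i in range(j, k-j) is a valid index of orig, so pyGetD with a dummy default is exact)
def pvBLevel (orig : List (Int × Int × Int × Int)) (k j : Int) : List (Int × Int × Int × Int) :=
  (PySem.List.pyRange j (k - j) 1).map (fun i =>
    let r := PySem.List.pyGetD orig i (0, 0, 0, 0)
    (r.1 + j, r.2.1, r.2.2.1, r.2.2.2))

def structure_ls_alt (dic : List (Int × Int × Int × Int × Int)) : List (List (Int × Int × Int × Int)) :=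
  let orig := key2list dic
  let k : Int := orig.length
  (PySem.List.pyRange 1 (PySem.Int.floordiv (k + 1) 2) 1).map (fun j => pvBLevel orig k j)

-- ===== PRECONDITION & SPEC =====
def Spec_structure_ls (dic : List (Int × Int × Int × Int × Int)) (out : List (List (Int × Int × Int × Int))) : Prop := out = structure_ls_alt dic
instance (dic : List (Int × Int × Int × Int × Int)) (out : List (List (Int × Int × Int × Int))) : Decidable (Spec_structure_ls dic out) := by unfold Spec_structure_ls; infer_instance

-- ===== CLAIM =====
def Claim_equal_structure_ls : Prop := ∀ (dic : List (Int × Int × Int × Int × Int)), Dom_structure_ls dic → Spec_structure_ls dic (structure_ls dic)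

-- ===== LEMMAS AND PROOFS =====

-- the list A's loop holds after j iterations: orig trimmed j times with j added in front
def pvLvl (orig : List (Int × Int × Int × Int)) (j : Nat) : List (Int × Int × Int × Int) :=
  ((orig.drop j).take (orig.length - 2 * j)).map
    (fun r => (r.1 + (j : Int), r.2.1, r.2.2.1, r.2.2.2))

theorem pvLvl_zero (orig : List (Int × Int × Int × Int)) : pvLvl orig 0 = orig := by
  simp [pvLvl]

theorem pvLvl_length (orig : List (Int × Int × Int × Int)) (j : Nat) :
    (pvLvl orig j).length = orig.length - 2 * j := by
  simp [pvLvl]; omega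

-- xs[1:-1] as drop/take (exact for every length; both sides are [] when len < 2)
theorem slice_one_negone {α : Type} (xs : List α) :
    PySem.List.slice xs (some 1) (some (-1)) = (xs.drop 1).take (xs.length - 2) := by
  simp [PySem.List.slice, PySem.List.clampIdx]
  cases xs with
  | nil => simp
  | cons a t => simp

-- one iteration of A's loop turns level j into level j+1
theorem pvLvl_step (orig : List (Int × Int × Int × Int)) (j : Nat)
    (h : 2 * j + 2 < orig.length) :
    (PySem.List.slice (pvLvl orig j) (some 1) (some (-1))).map
        (fun r => (r.1 + 1, r.2.1, r.2.2.1, r.2.2.2)) = pvLvl orig (j + 1) := by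
  rw [slice_one_negone]
  unfold pvLvl
  simp [List.drop_take, List.take_take, List.drop_drop, List.map_map, List.map_take, List.map_drop]
  congr 1
  · omega
  · congr 1
    apply List.map_congr_left
    intro r _
    simp [Function.comp, add_assoc]

-- B's inner comprehension at level j equals pvLvl orig j (both empty when the range is)
theorem pvBLevel_eq (orig : List (Int × Int × Int × Int)) (j : Nat) :
    pvBLevel orig (orig.length : Int) (j : Int) = pvLvl orig j := by
  unfold pvBLevel pvLvl
  rw [PySem.List.pyRange_one]
  apply List.ext_getElem
  · simp; omega
  · intro t h1 h2
    simp only [List.getElem_map, List.getElem_range, List.getElem_take, List.getElem_drop]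
    have ht : j + t < orig.length := by simp at h1; omega
    rw [PySem.List.pyGetD_eq_getElem orig (0,0,0,0) (by positivity) (by omega)]
    congr 2

-- A's loop from level j onward equals B's remaining outer range
theorem pvLoop_eq (orig : List (Int × Int × Int × Int)) :
    ∀ (d j : Nat), orig.length ≤ 2 * j + d →
      pvALoop (pvLvl orig j) =
        (PySem.List.pyRange ((j : Int) + 1)
            (PySem.Int.floordiv ((orig.length : Int) + 1) 2) 1).map
          (fun i => pvBLevel orig (orig.length : Int) i) := by
  intro d
  have hfd : PySem.Int.floordiv ((orig.length : Int) + 1) 2 = (((orig.length + 1) / 2 : Nat) : Int) := by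
    rw [PySem.Int.floordiv_eq_ediv_of_pos (by omega)]; omega
  induction d with
  | zero =>
      intro j hj
      rw [pvALoop, dif_neg (by rw [pvLvl_length]; omega), hfd,
        PySem.List.pyRange_one_eq_nil (by omega), List.map_nil]
  | succ d ih =>
      intro j hj
      by_cases hc : 2 * j + 2 < orig.length
      · rw [pvALoop, dif_pos (by rw [pvLvl_length]; omega)]
        rw [hfd, PySem.List.pyRange_one_cons (by omega), List.map_cons]
        simp only
        rw [pvLvl_step orig j hc]
        have hb := pvBLevel_eq orig (j + 1)
        push_cast at hb
        rw [hb]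
        have h2 := ih (j + 1) (by omega)
        push_cast at h2
        rw [h2, hfd]
      · rw [pvALoop, dif_neg (by rw [pvLvl_length]; omega), hfd,
          PySem.List.pyRange_one_eq_nil (by omega), List.map_nil]

-- ===== VERDICT =====
theorem structure_ls_spec : Claim_equal_structure_ls := by
  intro dic _
  unfold Spec_structure_ls structure_ls structure_ls_alt
  have h := pvLoop_eq (key2list dic) (key2list dic).length 0 (by omega)
  rw [pvLvl_zero] at h
  simpa using h
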